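-- pv_equiv track=rewrite | github.com/kristenwon/projects | project_won_kristen/helper.py | getTallestCoaster
-- ===== SOURCE A (Python) =====
-- def getTallestCoaster(coastersList):
--     # tracks the tallest height
--     maxHeight = 0
--     tallestCoaster = {}
--
--     for coaster in coastersList:
--         # determines height for each coaster
--         # based on dictionary value
--         numHeight = coaster.get("height")
--         if numHeight.isdigit():
--             height = int(numHeight)
--             if height > maxHeight:
--                 maxHeight = height
--                 tallestCoaster = coaster
--
--     return tallestCoaster
-- ===== SOURCE B (Python) =====
-- def getTallestCoaster(coastersList):
--     # sort-then-pick: filter eligible coasters, stable-sort by height descending,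
--     # take the first (keeps first-encountered among equal heights)
--     eligible = [c for c in coastersList
--                 if c.get("height").isdigit() and int(c.get("height")) > 0]
--     ranked = sorted(eligible, key=lambda c: int(c.get("height")), reverse=True)
--     return ranked[0] if ranked else {}
-- ===== Notes on version B (the rewrite author's own statement) =====
-- stated objective: alternative
-- what changed: Replaces A's incremental running-max scan (maxHeight/tallestCoaster accumulator) by filter-eligible + stable descending sort by int(height) + take the first element (stability preserves A's first-occurrence tie-breaking).
import Mathlib
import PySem

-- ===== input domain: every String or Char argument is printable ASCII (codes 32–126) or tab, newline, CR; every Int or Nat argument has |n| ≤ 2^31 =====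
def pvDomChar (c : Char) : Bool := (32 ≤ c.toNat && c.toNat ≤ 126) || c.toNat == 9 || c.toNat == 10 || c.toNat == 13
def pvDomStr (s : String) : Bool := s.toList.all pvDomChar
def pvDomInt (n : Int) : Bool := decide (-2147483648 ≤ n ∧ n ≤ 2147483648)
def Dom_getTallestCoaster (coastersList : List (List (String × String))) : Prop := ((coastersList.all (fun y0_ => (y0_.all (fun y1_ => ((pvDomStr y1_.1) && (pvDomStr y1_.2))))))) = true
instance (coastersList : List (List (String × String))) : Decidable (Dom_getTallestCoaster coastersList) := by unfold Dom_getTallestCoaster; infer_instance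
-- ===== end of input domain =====

-- B replaces A's running-max scan by filter + stable descending sort + head (same return value; not faster).

-- ===== PORT A =====
-- coaster.get("height"): Pre_ guarantees the key is present (Python raises AttributeError on None otherwise), so .getD "" is exact there
def pvHeightStr (coaster : List (String × String)) : String :=
  ((PySem.Dict.mk coaster).get? "height").getD ""

def getTallestCoaster (coastersList : List (List (String × String))) : List (String × String) :=
  (coastersList.foldl
    (fun (st : Int × List (String × String)) coaster =>
      let numHeight := pvHeightStr coaster
      if PySem.Str.strIsdigit numHeight then
        let height := (PySem.Int.ofStr? numHeight).getD 0   -- isdigit holds, so int() succeeds; getD 0 unreachable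
        if st.1 < height then (height, coaster) else st
      else st)
    (0, ([] : List (String × String)))).2

-- ===== PORT B =====
def pvHeightVal (coaster : List (String × String)) : Int :=
  (PySem.Int.ofStr? (pvHeightStr coaster)).getD 0   -- int(c.get("height")); called only where isdigit holds

def getTallestCoaster_alt (coastersList : List (List (String × String))) : List (String × String) :=
  let eligible := coastersList.filter
    (fun c => PySem.Str.strIsdigit (pvHeightStr c) && decide ((0 : Int) < pvHeightVal c))
  let ranked := PySem.List.sorted eligible pvHeightVal true
  ranked.headD []

-- ===== PRECONDITION & SPEC =====
-- Pre_ excludes exactly the inputs where some coaster has no "height" key: there A raises AttributeError (None.isdigit()), and B raises too.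
def Pre_getTallestCoaster (coastersList : List (List (String × String))) : Prop :=
  ∀ c ∈ coastersList, (PySem.Dict.mk c).contains "height" = true
instance (coastersList : List (List (String × String))) : Decidable (Pre_getTallestCoaster coastersList) := by unfold Pre_getTallestCoaster; infer_instance

def pvWitness_getTallestCoaster : (List (List (String × String))) :=
  [[("height", "12"), ("name", "a")], [("height", "0")], [("height", "007")], [("height", "9")], [("height", " 7 ")]]

def Spec_getTallestCoaster (coastersList : List (List (String × String))) (out : List (String × String)) : Prop := out = getTallestCoaster_alt coastersList
instance (coastersList : List (List (String × String))) (out : List (String × String)) : Decidable (Spec_getTallestCoaster coastersList out) := by unfold Spec_getTallestCoaster; infer_instance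

-- ===== CLAIM (what is proved, stated in full; the proofs are below) =====
def Claim_equal_getTallestCoaster : Prop := ∀ (coastersList : List (List (String × String))), Dom_getTallestCoaster coastersList → Pre_getTallestCoaster coastersList → Spec_getTallestCoaster coastersList (getTallestCoaster coastersList)

-- ===== LEMMAS AND PROOFS =====

-- A's loop step and B's (post sorted_rev_eq_foldl_insertBy / foldl_filter) loop step
def pvStepA (st : Int × List (String × String)) (coaster : List (String × String)) :
    Int × List (String × String) :=
  if PySem.Str.strIsdigit (pvHeightStr coaster) then
    if st.1 < pvHeightVal coaster then (pvHeightVal coaster, coaster) else st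
  else st

def pvStepB (acc : List (List (String × String))) (c : List (String × String)) :
    List (List (String × String)) :=
  if PySem.Str.strIsdigit (pvHeightStr c) && decide ((0 : Int) < pvHeightVal c)
  then PySem.List.insertBy (fun a b => decide (pvHeightVal b < pvHeightVal a)) c acc
  else acc

-- invariant tying A's state to B's accumulator
def pvInv (st : Int × List (String × String)) (acc : List (List (String × String))) : Prop :=
  (acc = [] ∧ st = (0, [])) ∨
  (∃ y t, acc = y :: t ∧ st = (pvHeightVal y, y) ∧ 0 < pvHeightVal y)

theorem pvStep_inv (st : Int × List (String × String)) (acc : List (List (String × String)))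
    (x : List (String × String)) (h : pvInv st acc) : pvInv (pvStepA st x) (pvStepB acc x) := by
  unfold pvStepA pvStepB pvInv
  by_cases hd : PySem.Str.strIsdigit (pvHeightStr x)
  · simp only [hd, if_true, Bool.true_and]
    rcases h with ⟨ha, hst⟩ | ⟨y, t, ha, hst, hy⟩
    · subst ha; subst hst
      by_cases hx : (0 : Int) < pvHeightVal x
      · simp only [hx, decide_true, if_true, PySem.List.insertBy]
        exact Or.inr ⟨x, [], by trivial, by trivial, hx⟩
      · simp only [hx, decide_false, Bool.false_eq_true, if_false]
        exact Or.inl ⟨by trivial, by trivial⟩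
    · subst ha; subst hst
      by_cases hx : (0 : Int) < pvHeightVal x
      · simp only [hx, decide_true, if_true, PySem.List.insertBy]
        by_cases hlt : pvHeightVal y < pvHeightVal x
        · simp only [hlt, if_true, decide_true]
          exact Or.inr ⟨x, y :: t, by trivial, by trivial, hx⟩
        · simp only [hlt, if_false, decide_false, Bool.false_eq_true]
          exact Or.inr ⟨y, _, by trivial, by trivial, hy⟩
      · have hlt : ¬ pvHeightVal y < pvHeightVal x := by omega
        simp only [hx, hlt, decide_false, Bool.false_eq_true, if_false]
        exact Or.inr ⟨y, t, by trivial, by trivial, hy⟩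
  · simp only [hd, Bool.false_and, Bool.false_eq_true, if_false]
    exact h

theorem pvLoop (l : List (List (String × String))) :
    ∀ (st : Int × List (String × String)) (acc : List (List (String × String))),
    pvInv st acc → (l.foldl pvStepA st).2 = (l.foldl pvStepB acc).headD [] := by
  induction l with
  | nil =>
    intro st acc h
    rcases h with ⟨ha, hst⟩ | ⟨y, t, ha, hst, _⟩ <;> simp [ha, hst]
  | cons x xs ih =>
    intro st acc h
    simp only [List.foldl_cons]
    exact ih _ _ (pvStep_inv st acc x h)

theorem pvA_eq (l : List (List (String × String))) :
    getTallestCoaster l = (l.foldl pvStepA (0, [])).2 := rfl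

theorem pvB_eq (l : List (List (String × String))) :
    getTallestCoaster_alt l = (l.foldl pvStepB []).headD [] := by
  show (PySem.List.sorted (l.filter (fun c =>
      PySem.Str.strIsdigit (pvHeightStr c) && decide ((0 : Int) < pvHeightVal c)))
      pvHeightVal true).headD [] = _
  rw [PySem.List.sorted_rev_eq_foldl_insertBy, List.foldl_filter]
  rfl

-- ===== VERDICT (by name: the statement is the Claim_ definition above) =====
theorem getTallestCoaster_spec : Claim_equal_getTallestCoaster := by
  intro coastersList _ _
  unfold Spec_getTallestCoaster
  rw [pvA_eq, pvB_eq]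
  exact pvLoop coastersList (0, []) [] (Or.inl ⟨rfl, rfl⟩)
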